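-- pv_equiv track=rewrite | github.com/pypi-data/pypi-mirror-401 | packages/magical-athlete-simulator/magical_athlete_simulator-0.7.1-py3-none-any.whl/magical_athlete_simulator/simulation/combinations.py | get_combination_at_index
-- ===== SOURCE A (Python) =====
-- import math
--
-- def get_combination_at_index(n: int, k: int, index: int) -> list[int]:
--     """
--     Decodes a linear index into a specific combination (Unranking).
--
--     This implements the 'Combinadic' (Combinatorial Number System).
--     It allows us to treat the set of all possible combinations as a linear
--     array without ever allocating that array in memory.
--
--     Mathematically:
--     Any integer 'index' < (n choose k) has a unique representation as a sum
--     of combinatorial coefficients: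
--       index = (c_k choose k) + ... + (c_1 choose 1)
--       where n > c_k > ... > c_1 >= 0
--
--     Args:
--         n: Size of the eligible population (e.g., 20 racers)
--         k: Size of the team to pick (e.g., 4 racers)
--         index: The i-th lexicographical combination (0-based)
--
--     Returns:
--         A list of 'k' integers representing the indices of the selected items.
--         (e.g., [0, 5, 12] means 1st, 6th, and 13th racer in the list).
--     """
--     result = []
--     a = n
--     b = k
--     x = (math.comb(n, k) - 1) - index  # Dual index mapping for easier math
--
--     for i in range(k):
--         a -= 1
--         while True:
--             c = math.comb(a, b)
--             if x >= c:
--                 x -= c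
--                 result.append(n - 1 - a)
--                 b -= 1
--                 break
--             a -= 1
--     return result
-- ===== SOURCE B (Python) =====
-- import math
--
-- def get_combination_at_index(n: int, k: int, index: int) -> list[int]:
--     """Unrank by scanning candidate values upward, keeping a running coefficient
--     c = comb(m, rem-1) updated multiplicatively (no comb calls inside the loop)."""
--     result = []
--     if k == 0:
--         return result
--     x = index
--     rem = k                    # slots still to fill
--     m = n - 1                  # elements above the current candidate
--     c = math.comb(m, rem - 1)  # combinations that keep the current candidate
--     v = 0
--     while True:
--         if x < c:
--             result.append(v)
--             rem -= 1
--             if rem == 0: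
--                 return result
--             c = c * rem // m
--         else:
--             x -= c
--             c = c * (m - rem + 1) // m
--         v += 1
--         m -= 1
-- ===== Notes on version B (the rewrite author's own statement) =====
-- stated objective: faster
-- what changed: Instead of A's dual-index descent calling math.comb for every candidate, B scans candidate values upward once, maintaining the running coefficient comb(m, rem-1) by one exact multiply/divide per step, so no comb evaluation happens inside the loop.
import Mathlib
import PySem

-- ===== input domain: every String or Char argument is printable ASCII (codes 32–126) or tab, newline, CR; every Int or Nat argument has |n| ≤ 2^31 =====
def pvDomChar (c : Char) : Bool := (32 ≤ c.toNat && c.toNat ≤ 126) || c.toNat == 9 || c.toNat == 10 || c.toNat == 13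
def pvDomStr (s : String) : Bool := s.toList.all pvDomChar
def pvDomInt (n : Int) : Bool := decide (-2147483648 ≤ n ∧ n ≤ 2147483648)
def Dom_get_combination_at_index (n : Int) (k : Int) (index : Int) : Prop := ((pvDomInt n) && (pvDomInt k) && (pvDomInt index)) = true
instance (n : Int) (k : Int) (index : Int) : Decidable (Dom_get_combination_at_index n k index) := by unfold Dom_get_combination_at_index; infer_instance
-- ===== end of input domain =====

-- B replaces A's dual-index descent (one math.comb call per candidate) by a single
-- upward scan that maintains the coefficient comb(m, rem-1) multiplicatively: faster.

-- math.comb on the nonnegative arguments the admitted executions reach (Python raises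
-- ValueError on negative arguments; such executions are excluded by Pre_ / guarded below).
def pyComb (a b : Int) : Int := (a.toNat.choose b.toNat : Int)

-- ===== PORT A =====
-- A's inner `while True`: decrement a until comb(a, b) <= x; none = the ValueError
-- Python raises when a becomes negative (math.comb rejects negative arguments).
def innerA (b x : Int) (a : Int) : Option (Int × Int) :=
  if a < 0 then none
  else if pyComb a b ≤ x then some (a, x - pyComb a b)
  else innerA b x (a - 1)
termination_by (a + 1).toNat
decreasing_by omega

-- A's `for i in range(k)` loop over state (a, b, x, result).
def loopA (n : Int) : Nat → Int → Int → Int → List Int → List Int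
  | 0, _, _, _, res => res
  | i + 1, a, b, x, res =>
    match innerA b x (a - 1) with
    | none => res   -- unreachable under Pre_: Python raised
    | some (m, x') => loopA n i m (b - 1) x' (res ++ [n - 1 - m])

def get_combination_at_index (n : Int) (k : Int) (index : Int) : List Int :=
  loopA n k.toNat n k (pyComb n k - 1 - index) []

-- ===== PORT B =====
-- B's `while True` loop over state (x, rem, m, c, v, result).  The `m ≤ 0` guards are
-- where Python's `// m` raises ZeroDivisionError (m = 0; unreachable under Pre_;
-- m < 0 is unreachable from the entry state since the guard stops at 0).
def loopB2 (x rem m c v : Int) (res : List Int) : List Int :=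
  if x < c then
    if rem - 1 = 0 then res ++ [v]
    else if _hm : m ≤ 0 then res ++ [v]
    else loopB2 x (rem - 1) (m - 1) (PySem.Int.floordiv (c * (rem - 1)) m) (v + 1) (res ++ [v])
  else
    if _hm : m ≤ 0 then res
    else loopB2 (x - c) rem (m - 1) (PySem.Int.floordiv (c * (m - rem + 1)) m) (v + 1) res
termination_by m.toNat
decreasing_by all_goals omega

def get_combination_at_index_alt (n : Int) (k : Int) (index : Int) : List Int :=
  if k = 0 then []
  else loopB2 index k (n - 1) (pyComb (n - 1) (k - 1)) 0 []

-- ===== PRECONDITION & SPEC =====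
-- Exactly the inputs where the Python A returns: math.comb raises ValueError for
-- negative n or k; for 0 < k with k > n, or 0 < k ≤ n with index ≥ C(n,k), the
-- descent drives `a` negative and math.comb raises ValueError there too.
def Pre_get_combination_at_index (n : Int) (k : Int) (index : Int) : Prop :=
  0 ≤ k ∧ k ≤ n ∧ (k = 0 ∨ index < (n.toNat.choose k.toNat : Int))
instance (n : Int) (k : Int) (index : Int) : Decidable (Pre_get_combination_at_index n k index) := by
  unfold Pre_get_combination_at_index; infer_instance

def pvWitness_get_combination_at_index : Int × Int × Int := (5, 2, 3)

def Spec_get_combination_at_index (n : Int) (k : Int) (index : Int) (out : List Int) : Prop := out = get_combination_at_index_alt n k index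
instance (n : Int) (k : Int) (index : Int) (out : List Int) : Decidable (Spec_get_combination_at_index n k index out) := by unfold Spec_get_combination_at_index; infer_instance

-- ===== CLAIM (what is proved, stated in full; the proofs are below) =====
def Claim_equal_get_combination_at_index : Prop := ∀ (n : Int) (k : Int) (index : Int), Dom_get_combination_at_index n k index → Pre_get_combination_at_index n k index → Spec_get_combination_at_index n k index (get_combination_at_index n k index)

-- ===== LEMMAS AND PROOFS =====

theorem pyComb_mono {a a' : Int} (b : Int) (h : a ≤ a') : pyComb a b ≤ pyComb a' b := by
  unfold pyComb
  exact_mod_cast Nat.choose_le_choose b.toNat (by omega)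

theorem pyComb_eq_zero {a b : Int} (h : a < b) (hb : 0 ≤ a) : pyComb a b = 0 := by
  unfold pyComb
  rw [Nat.choose_eq_zero_of_lt (by omega)]
  rfl

theorem pyComb_pascal {a r : Int} (ha : 0 ≤ a) (hr : 0 ≤ r) :
    pyComb (a + 1) (r + 1) = pyComb a (r + 1) + pyComb a r := by
  unfold pyComb
  have h1 : (a + 1).toNat = a.toNat + 1 := by omega
  have h2 : (r + 1).toNat = r.toNat + 1 := by omega
  rw [h1, h2, Nat.choose_succ_succ]
  push_cast
  ring

-- exact division behind B's `c = c * (m - rem + 1) // m` (skip step)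
theorem pyComb_div_skip {a r : Int} (ha : 1 ≤ a) (hr : 0 ≤ r) :
    PySem.Int.floordiv (pyComb a r * (a - r)) a = pyComb (a - 1) r := by
  rw [PySem.Int.floordiv_eq_ediv_of_pos (by omega)]
  by_cases h : r ≤ a
  · have key : (a - 1).toNat.choose r.toNat * a.toNat = a.toNat.choose r.toNat * (a.toNat - r.toNat) := by
      have h2 := Nat.choose_mul_succ_eq (a.toNat - 1) r.toNat
      have h3 : a.toNat - 1 + 1 = a.toNat := by omega
      rw [h3] at h2
      have h4 : (a - 1).toNat = a.toNat - 1 := by omega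
      rw [h4]
      exact h2
    have hca : ((a.toNat : Nat) : Int) = a := Int.toNat_of_nonneg (by omega)
    have hcr : ((r.toNat : Nat) : Int) = r := Int.toNat_of_nonneg hr
    have k2 : ((a.toNat.choose r.toNat * (a.toNat - r.toNat) : Nat) : Int)
        = (((a - 1).toNat.choose r.toNat * a.toNat : Nat) : Int) := by exact_mod_cast key.symm
    rw [Nat.cast_mul, Nat.cast_mul, Nat.cast_sub (by omega : r.toNat ≤ a.toNat), hca, hcr] at k2
    have : pyComb a r * (a - r) = pyComb (a - 1) r * a := by
      unfold pyComb
      exact k2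
    rw [this, Int.mul_ediv_cancel _ (by omega : a ≠ 0)]
  · have hz1 : pyComb a r = 0 := pyComb_eq_zero (by omega) (by omega)
    have hz2 : pyComb (a - 1) r = 0 := pyComb_eq_zero (by omega) (by omega)
    rw [hz1, hz2, zero_mul, Int.zero_ediv]

-- exact division behind B's `c = c * rem // m` (take step)
theorem pyComb_div_take {m r : Int} (hm : 1 ≤ m) (hr : 1 ≤ r) :
    PySem.Int.floordiv (pyComb m r * r) m = pyComb (m - 1) (r - 1) := by
  rw [PySem.Int.floordiv_eq_ediv_of_pos (by omega)]
  have key : m.toNat * (m.toNat - 1).choose (r.toNat - 1) = m.toNat.choose r.toNat * r.toNat := by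
    have h2 := Nat.succ_mul_choose_eq (m.toNat - 1) (r.toNat - 1)
    rw [Nat.succ_eq_add_one, Nat.succ_eq_add_one,
      (by omega : m.toNat - 1 + 1 = m.toNat), (by omega : r.toNat - 1 + 1 = r.toNat)] at h2
    exact h2
  have hcm : ((m.toNat : Nat) : Int) = m := Int.toNat_of_nonneg (by omega)
  have hcr : ((r.toNat : Nat) : Int) = r := Int.toNat_of_nonneg (by omega)
  have h6 : (m - 1).toNat = m.toNat - 1 := by omega
  have h7 : (r - 1).toNat = r.toNat - 1 := by omega
  have k2 : ((m.toNat * (m.toNat - 1).choose (r.toNat - 1) : Nat) : Int)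
      = ((m.toNat.choose r.toNat * r.toNat : Nat) : Int) := by exact_mod_cast key
  rw [Nat.cast_mul, Nat.cast_mul, hcm, hcr, ← h6, ← h7] at k2
  have : pyComb m r * r = m * pyComb (m - 1) (r - 1) := by
    unfold pyComb
    exact k2.symm
  rw [this, Int.mul_ediv_cancel_left _ (by omega : m ≠ 0)]

theorem innerA_spec (b x : Int) : ∀ (N : Nat) (a : Int), a.toNat = N → 0 ≤ a → pyComb 0 b ≤ x →
    ∃ m, innerA b x a = some (m, x - pyComb m b) ∧ 0 ≤ m ∧ m ≤ a ∧ pyComb m b ≤ x ∧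
      (m = a ∨ x < pyComb (m + 1) b) := by
  intro N
  induction N with
  | zero =>
    intro a hN ha hx
    have ha0 : a = 0 := by omega
    subst ha0
    refine ⟨0, ?_, le_refl _, le_refl _, hx, Or.inl rfl⟩
    rw [innerA]
    simp [hx]
  | succ N ih =>
    intro a hN ha hx
    rw [innerA]
    by_cases hc : pyComb a b ≤ x
    · simp only [if_neg (by omega : ¬ a < 0), if_pos hc]
      exact ⟨a, rfl, ha, le_refl _, hc, Or.inl rfl⟩
    · obtain ⟨m, hm1, hm2, hm3, hm4, hm5⟩ := ih (a - 1) (by omega) (by omega) hx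
      refine ⟨m, ?_, hm2, by omega, hm4, ?_⟩
      · simp only [if_neg (by omega : ¬ a < 0), if_neg hc]
        exact hm1
      · rcases hm5 with h | h
        · right; rw [h, sub_add_cancel]; exact lt_of_not_ge hc
        · exact Or.inr h

theorem loop_eq2 : ∀ (i : Nat) (n h x : Int) (res : List Int), 0 ≤ x → (i : Int) + 1 ≤ h → h ≤ n →
    loopA n (i + 1) h ((i : Int) + 1) x res =
    loopB2 (pyComb h ((i : Int) + 1) - 1 - x) ((i : Int) + 1) (h - 1) (pyComb (h - 1) (i : Int)) (n - h) res := by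
  intro i
  induction i with
  | zero =>
    intro n h x res hx hih hhn
    simp only [Nat.cast_zero]
    simp only [Nat.cast_zero] at hih
    obtain ⟨m, hA1, hA2, hA3, hA4, hA5⟩ :=
      innerA_spec ((0 : Int) + 1) x (h - 1).toNat (h - 1) rfl (by omega)
        (by rw [pyComb_eq_zero (by omega) (le_refl _)]; exact hx)
    have skip : ∀ (d : Nat) (a : Int), a = m + (d : Int) → a ≤ h - 1 →
        loopB2 (pyComb (a + 1) ((0 : Int) + 1) - 1 - x) ((0 : Int) + 1) a (pyComb a (0 : Int)) (n - 1 - a) res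
          = res ++ [n - 1 - m] := by
      intro d
      induction d with
      | zero =>
        intro a had hale
        have ham : a = m := by omega
        subst ham
        rw [loopB2]
        have hlt : pyComb (a + 1) ((0 : Int) + 1) - 1 - x < pyComb a (0 : Int) := by
          have hp := pyComb_pascal (a := a) (r := 0) hA2 (le_refl _)
          omega
        simp only [if_pos hlt]
        norm_num
      | succ d ihd =>
        intro a had hale
        have ha1 : 1 ≤ a := by omega
        rw [loopB2]
        have hnlt : ¬ (pyComb (a + 1) ((0 : Int) + 1) - 1 - x < pyComb a (0 : Int)) := by
          have hp := pyComb_pascal (a := a) (r := 0) (by omega) (le_refl _)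
          have hgt : x < pyComb a ((0 : Int) + 1) := by
            rcases hA5 with he | hl
            · omega
            · exact lt_of_lt_of_le hl (pyComb_mono _ (by omega))
          omega
        simp only [if_neg hnlt, dif_neg (by omega : ¬ a ≤ 0)]
        have e1 : pyComb (a + 1) ((0 : Int) + 1) - 1 - x - pyComb a (0 : Int)
            = pyComb (a - 1 + 1) ((0 : Int) + 1) - 1 - x := by
          have hp := pyComb_pascal (a := a) (r := 0) (by omega) (le_refl _)
          have : a - 1 + 1 = a := by ring
          rw [this]; omega
        have e2 : PySem.Int.floordiv (pyComb a (0 : Int) * (a - ((0 : Int) + 1) + 1)) a = pyComb (a - 1) (0 : Int) := by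
          have := pyComb_div_skip (a := a) (r := 0) ha1 (le_refl _)
          simpa using this
        rw [e1, e2]
        have e3 : n - 1 - a + 1 = n - 1 - (a - 1) := by ring
        rw [e3]
        exact ihd (a - 1) (by omega) (by omega)
    have main := skip (h - 1 - m).toNat (h - 1) (by omega) (le_refl _)
    rw [show n - 1 - (h - 1) = n - h from by ring, show h - 1 + 1 = h from by ring] at main
    rw [loopA, hA1]
    simp only [loopA]
    exact main.symm
  | succ j ih =>
    intro n h x res hx hih hhn
    have hi1 : ((j + 1 : Nat) : Int) = (j : Int) + 1 := by push_cast; ring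
    rw [hi1]
    set r : Int := (j : Int) + 1 with hr
    have hr1 : 1 ≤ r := by omega
    obtain ⟨m, hA1, hA2, hA3, hA4, hA5⟩ :=
      innerA_spec (r + 1) x (h - 1).toNat (h - 1) rfl (by omega)
        (by rw [pyComb_eq_zero (by omega) (le_refl _)]; exact hx)
    have hmi : r ≤ m := by
      by_contra hlt
      rcases hA5 with he | hl
      · omega
      · have : pyComb (m + 1) (r + 1) = 0 := pyComb_eq_zero (by omega) (by omega)
        omega
    have skip : ∀ (d : Nat) (a : Int), a = m + (d : Int) → a ≤ h - 1 →
        loopB2 (pyComb (a + 1) (r + 1) - 1 - x) (r + 1) a (pyComb a r) (n - 1 - a) res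
          = loopA n (j + 1) m r (x - pyComb m (r + 1)) (res ++ [n - 1 - m]) := by
      intro d
      induction d with
      | zero =>
        intro a had hale
        have ham : a = m := by omega
        subst ham
        rw [loopB2]
        have hlt : pyComb (a + 1) (r + 1) - 1 - x < pyComb a r := by
          have hp := pyComb_pascal (a := a) (r := r) hA2 (by omega)
          omega
        simp only [if_pos hlt]
        have hne : ¬ (r + 1 - 1 = 0) := by omega
        simp only [if_neg hne, dif_neg (by omega : ¬ a ≤ 0)]
        have e1 : pyComb (a + 1) (r + 1) - 1 - x = pyComb a r - 1 - (x - pyComb a (r + 1)) := by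
          have hp := pyComb_pascal (a := a) (r := r) hA2 (by omega)
          omega
        have e2 : r + 1 - 1 = r := by ring
        rw [e1, e2, pyComb_div_take (by omega : 1 ≤ a) hr1]
        have := ih n a (x - pyComb a (r + 1)) (res ++ [n - 1 - a]) (by omega) (by omega) (by omega)
        have e5 : r - 1 = (j : Int) := by omega
        rw [e5]
        have e6 : n - 1 - a + 1 = n - a := by ring
        rw [e6]
        exact this.symm
      | succ d ihd =>
        intro a had hale
        have ha1 : 1 ≤ a := by omega
        rw [loopB2]
        have hnlt : ¬ (pyComb (a + 1) (r + 1) - 1 - x < pyComb a r) := by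
          have hp := pyComb_pascal (a := a) (r := r) (by omega) (by omega)
          have hgt : x < pyComb a (r + 1) := by
            rcases hA5 with he | hl
            · omega
            · exact lt_of_lt_of_le hl (pyComb_mono _ (by omega))
          omega
        simp only [if_neg hnlt, dif_neg (by omega : ¬ a ≤ 0)]
        have e1 : pyComb (a + 1) (r + 1) - 1 - x - pyComb a r
            = pyComb (a - 1 + 1) (r + 1) - 1 - x := by
          have hp := pyComb_pascal (a := a) (r := r) (by omega) (by omega)
          have : a - 1 + 1 = a := by ring
          rw [this]; omega
        have e2 : PySem.Int.floordiv (pyComb a r * (a - (r + 1) + 1)) a = pyComb (a - 1) r := by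
          have := pyComb_div_skip (a := a) (r := r) ha1 (by omega)
          have e : a - (r + 1) + 1 = a - r := by ring
          rw [e]
          exact this
        rw [e1, e2]
        have e3 : n - 1 - a + 1 = n - 1 - (a - 1) := by ring
        rw [e3]
        exact ihd (a - 1) (by omega) (by omega)
    have main := skip (h - 1 - m).toNat (h - 1) (by omega) (le_refl _)
    rw [show n - 1 - (h - 1) = n - h from by ring, show h - 1 + 1 = h from by ring] at main
    rw [loopA, hA1]
    have e5 : r + 1 - 1 = r := by ring
    simp only [e5]
    exact main.symm

-- ===== VERDICT (by name: the statement is the Claim_ definition above) =====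
theorem get_combination_at_index_spec : Claim_equal_get_combination_at_index := by
  intro n k index _ hpre
  obtain ⟨hk0, hkn, hrest⟩ := hpre
  unfold Spec_get_combination_at_index get_combination_at_index get_combination_at_index_alt
  by_cases hkz : k = 0
  · subst hkz
    simp [loopA]
  · rw [if_neg hkz]
    have hidx : index < (n.toNat.choose k.toNat : Int) := by
      rcases hrest with hk | hi
      · exact absurd hk hkz
      · exact hi
    obtain ⟨j, hj⟩ : ∃ j : Nat, k = (j : Int) + 1 := ⟨(k - 1).toNat, by omega⟩
    subst hj
    have htn : ((j : Int) + 1).toNat = j + 1 := by omega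
    rw [htn]
    rw [htn] at hidx
    have hx : 0 ≤ pyComb n ((j : Int) + 1) - 1 - index := by
      have hc2 : pyComb n ((j : Int) + 1) = (n.toNat.choose ((j : Int) + 1).toNat : Int) := rfl
      rw [htn] at hc2
      omega
    have main := loop_eq2 j n n (pyComb n ((j : Int) + 1) - 1 - index) [] hx (by omega) (le_refl _)
    rw [show pyComb n ((j : Int) + 1) - 1 - (pyComb n ((j : Int) + 1) - 1 - index) = index from by ring,
        show n - n = (0 : Int) from by ring] at main
    rw [show ((j : Int) + 1) - 1 = (j : Int) from by ring]
    exact main
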